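-- pv_equiv track=rewrite | github.com/mohammadfaiizan/ProjectI | DSA/Theory/Bit_Manipulation/004_bit_bitmasking_subsets.py | maximum_xor_subset
-- ===== SOURCE A (Python) =====
-- def maximum_xor_subset(nums: list) -> int:
--     """
--     Find maximum XOR value among all subsets.
--
--     Args:
--         nums: Input array
--
--     Returns:
--         Maximum XOR value
--
--     Time: O(n * 2^n), Space: O(1)
--     """
--     n = len(nums)
--     max_xor = 0
--
--     for mask in range(1 << n):
--         current_xor = 0
--
--         for i in range(n):
--             if mask & (1 << i):
--                 current_xor ^= nums[i]
--
--         max_xor = max(max_xor, current_xor)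
--
--     return max_xor
-- ===== SOURCE B (Python) =====
-- def maximum_xor_subset(nums: list) -> int:
--     """Maximum XOR over all subsets, via the set of reachable XOR values."""
--     vals = {0}
--     for x in nums:
--         vals = vals | {v ^ x for v in vals}
--     return max(vals)
-- ===== Notes on version B (the rewrite author's own statement) =====
-- stated objective: faster
-- what changed: Instead of enumerating all 2^n subset masks and re-XORing each from scratch, B maintains the set of reachable XOR values (each element at most doubles it) and returns its maximum.
import Mathlib
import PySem

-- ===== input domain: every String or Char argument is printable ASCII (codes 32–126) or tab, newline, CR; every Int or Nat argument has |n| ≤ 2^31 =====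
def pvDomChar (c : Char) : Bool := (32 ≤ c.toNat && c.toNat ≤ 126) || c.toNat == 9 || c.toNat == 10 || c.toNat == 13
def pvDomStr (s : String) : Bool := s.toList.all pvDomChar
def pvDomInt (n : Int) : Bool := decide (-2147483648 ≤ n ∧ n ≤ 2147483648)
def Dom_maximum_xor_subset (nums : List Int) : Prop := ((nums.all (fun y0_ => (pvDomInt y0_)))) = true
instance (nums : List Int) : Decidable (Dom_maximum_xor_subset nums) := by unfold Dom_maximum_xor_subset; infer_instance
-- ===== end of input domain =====

-- B replaces A's enumeration of all 2^n subset masks by maintaining the set of reachable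
-- XOR values (each element at most doubles it) and taking its maximum.

-- ===== PORT A =====
def maximum_xor_subset (nums : List Int) : Int :=
  let n : Nat := nums.length
  (PySem.List.pyRange 0 ((1 <<< n : Nat) : Int) 1).foldl
    (fun max_xor mask =>
      let current_xor : Int :=
        (PySem.List.pyRange 0 (n : Int) 1).foldl
          (fun c i =>
            if PySem.Int.band mask ((1 : Int) <<< i.toNat) ≠ 0 then
              PySem.Int.bxor c (PySem.List.pyGetD nums i 0)
            else c) 0
      max max_xor current_xor) 0

-- ===== PORT B =====
def maximum_xor_subset_alt (nums : List Int) : Int :=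
  let vals : PySem.Set Int :=
    nums.foldl (fun s x => PySem.Set.union s (s.map (fun v => PySem.Int.bxor v x)))
      (PySem.Set.ofList [0])
  -- vals always contains 0, so Python's max never raises; the getD 0 default is unreachable
  (PySem.List.max? vals (fun y => y)).getD 0

-- ===== PRECONDITION & SPEC =====
def Spec_maximum_xor_subset (nums : List Int) (out : Int) : Prop := out = maximum_xor_subset_alt nums
instance (nums : List Int) (out : Int) : Decidable (Spec_maximum_xor_subset nums out) := by unfold Spec_maximum_xor_subset; infer_instance

-- ===== CLAIM (what is proved, stated in full; the proofs are below) =====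
def Claim_equal_maximum_xor_subset : Prop := ∀ (nums : List Int), Dom_maximum_xor_subset nums → Spec_maximum_xor_subset nums (maximum_xor_subset nums)

-- ===== LEMMAS AND PROOFS =====

-- A's inner loop, as a function of the mask
def pvCur (nums : List Int) (mask : Int) : Int :=
  (PySem.List.pyRange 0 (nums.length : Int) 1).foldl
    (fun c i =>
      if PySem.Int.band mask ((1 : Int) <<< i.toNat) ≠ 0 then
        PySem.Int.bxor c (PySem.List.pyGetD nums i 0)
      else c) 0

-- the list of all subset XORs, element i selected by bit i, masks in increasing order
def pvSeq (nums : List Int) : List Int :=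
  nums.foldl (fun acc x => acc ++ acc.map (fun v => PySem.Int.bxor v x)) [0]

-- B's fold
def pvVals (nums : List Int) : PySem.Set Int :=
  nums.foldl (fun s x => PySem.Set.union s (s.map (fun v => PySem.Int.bxor v x)))
    (PySem.Set.ofList [0])

theorem pvShift_cast (k : Nat) : ((1:Int) <<< ((k : Int))) = (((1 <<< k : Nat)) : Int) := by
  show ((Nat.shiftLeft' false 1 k : Nat) : Int) = _
  rw [Nat.shiftLeft'_false]

theorem pvBand_bit (m k : Nat) :
    (PySem.Int.band (m : Int) ((1:Int) <<< ((k : Int))) ≠ 0) ↔ m.testBit k := by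
  rw [pvShift_cast, PySem.Int.band_natCast, Nat.shiftLeft_eq, Nat.one_mul, Nat.and_two_pow]
  cases h : m.testBit k <;> simp

theorem pvCur_append (xs : List Int) (x : Int) (mask : Int) :
    pvCur (xs ++ [x]) mask =
      if PySem.Int.band mask ((1 : Int) <<< ((xs.length : Int))) ≠ 0 then
        PySem.Int.bxor (pvCur xs mask) x
      else pvCur xs mask := by
  unfold pvCur
  have hlen : ((xs ++ [x]).length : Int) = (xs.length : Int) + 1 := by simp
  rw [hlen, PySem.List.pyRange_one_succ_right (by positivity), List.foldl_append]
  have hrange :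
      List.foldl
        (fun c i =>
          if PySem.Int.band mask ((1 : Int) <<< i.toNat) ≠ 0 then
            PySem.Int.bxor c (PySem.List.pyGetD (xs ++ [x]) i 0)
          else c) 0 (PySem.List.pyRange 0 (xs.length : Int) 1) =
      List.foldl
        (fun c i =>
          if PySem.Int.band mask ((1 : Int) <<< i.toNat) ≠ 0 then
            PySem.Int.bxor c (PySem.List.pyGetD xs i 0)
          else c) 0 (PySem.List.pyRange 0 (xs.length : Int) 1) := by
    apply PySem.List.foldl_congr_mem
    intro c i hi
    rw [PySem.List.mem_pyRange_one] at hi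
    obtain ⟨k, rfl⟩ := Int.eq_ofNat_of_zero_le hi.1
    have hk : k < xs.length := by exact_mod_cast hi.2
    rw [PySem.List.pyGetD_natCast, PySem.List.pyGetD_natCast, List.getD_append _ _ _ _ hk]
  rw [hrange]
  simp only [List.foldl_cons, List.foldl_nil]
  have hget : PySem.List.pyGetD (xs ++ [x]) ((xs.length : Nat) : Int) 0 = x := by
    rw [PySem.List.pyGetD_natCast]
    simp
  rw [hget, Int.toNat_natCast]

theorem pvCur_add_high (xs : List Int) (k m : Nat) (hk : xs.length ≤ k) :
    pvCur xs ((2 ^ k + m : Nat) : Int) = pvCur xs ((m : Nat) : Int) := by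
  induction xs using List.reverseRecOn with
  | nil => rfl
  | append_singleton xs x ih =>
      have hx : xs.length < k := by simp at hk; omega
      rw [pvCur_append, pvCur_append, ih (le_of_lt hx)]
      have hbit : (2 ^ k + m).testBit xs.length = m.testBit xs.length :=
        Nat.testBit_two_pow_add_gt hx m
      simp only [pvBand_bit, hbit]

theorem pvSeq_append (xs : List Int) (x : Int) :
    pvSeq (xs ++ [x]) = pvSeq xs ++ (pvSeq xs).map (fun v => PySem.Int.bxor v x) := by
  unfold pvSeq
  rw [List.foldl_append]
  simp

theorem pvMap_cur_eq_seq (nums : List Int) :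
    (List.range (2 ^ nums.length)).map (fun m => pvCur nums ((m : Nat) : Int)) = pvSeq nums := by
  induction nums using List.reverseRecOn with
  | nil => rfl
  | append_singleton xs x ih =>
      have hlen : (xs ++ [x]).length = xs.length + 1 := by simp
      rw [hlen, show 2 ^ (xs.length + 1) = 2 ^ xs.length + 2 ^ xs.length by ring,
        List.range_add, List.map_append, List.map_map]
      have h1 : (List.range (2 ^ xs.length)).map (fun m => pvCur (xs ++ [x]) ((m : Nat) : Int)) =
          (List.range (2 ^ xs.length)).map (fun m => pvCur xs ((m : Nat) : Int)) := by
        apply List.map_congr_left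
        intro m hm
        rw [List.mem_range] at hm
        rw [pvCur_append]
        have : PySem.Int.band ((m : Nat) : Int) ((1:Int) <<< ((xs.length : Int))) = 0 := by
          by_contra h
          have := (pvBand_bit m xs.length).mp h
          rw [Nat.testBit_lt_two_pow hm] at this
          exact Bool.false_ne_true this
        simp [this]
      have h2 : (List.range (2 ^ xs.length)).map
            ((fun m => pvCur (xs ++ [x]) ((m : Nat) : Int)) ∘ (fun y => 2 ^ xs.length + y)) =
          ((List.range (2 ^ xs.length)).map (fun m => pvCur xs ((m : Nat) : Int))).map
            (fun v => PySem.Int.bxor v x) := by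
        rw [List.map_map]
        apply List.map_congr_left
        intro m hm
        rw [List.mem_range] at hm
        simp only [Function.comp]
        rw [pvCur_append]
        have hbit : PySem.Int.band ((2 ^ xs.length + m : Nat) : Int) ((1:Int) <<< ((xs.length : Int))) ≠ 0 := by
          rw [pvBand_bit, Nat.testBit_two_pow_add_eq, Nat.testBit_lt_two_pow hm]
          rfl
        rw [if_pos hbit, pvCur_add_high xs xs.length m (le_refl _)]
      rw [h1, h2, ih, pvSeq_append]

-- foldl max bounds
theorem pvLe_foldl_max (l : List Int) (a : Int) : a ≤ l.foldl max a := by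
  induction l generalizing a with
  | nil => exact le_refl a
  | cons y t ih => exact le_trans (le_max_left a y) (ih (max a y))

theorem pvMem_le_foldl_max (l : List Int) (a x : Int) (hx : x ∈ l) : x ≤ l.foldl max a := by
  induction l generalizing a with
  | nil => cases hx
  | cons y t ih =>
      cases hx with
      | head => exact le_trans (le_max_right a x) (pvLe_foldl_max t _)
      | tail _ hx => exact ih _ hx

theorem pvFoldl_max_le (l : List Int) (a c : Int) (ha : a ≤ c) (h : ∀ x ∈ l, x ≤ c) :
    l.foldl max a ≤ c := by
  induction l generalizing a with
  | nil => exact ha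
  | cons y t ih =>
      exact ih _ (max_le ha (h y (by simp))) (fun x hx => h x (by simp [hx]))

theorem pvFoldl_max_congr (l m : List Int) (a : Int) (h : ∀ x, x ∈ l ↔ x ∈ m) :
    l.foldl max a = m.foldl max a := by
  apply le_antisymm
  · exact pvFoldl_max_le l a _ (pvLe_foldl_max m a) (fun x hx => pvMem_le_foldl_max m a x ((h x).mp hx))
  · exact pvFoldl_max_le m a _ (pvLe_foldl_max l a) (fun x hx => pvMem_le_foldl_max l a x ((h x).mpr hx))

theorem pvMem_vals (nums : List Int) (y : Int) : y ∈ pvVals nums ↔ y ∈ pvSeq nums := by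
  induction nums using List.reverseRecOn generalizing y with
  | nil => rfl
  | append_singleton xs x ih =>
      have ih : ∀ z, z ∈ pvVals xs ↔ z ∈ pvSeq xs := fun z => ih z
      unfold pvVals at *
      rw [List.foldl_append, pvSeq_append]
      simp only [List.foldl_cons, List.foldl_nil, PySem.Set.mem_union, List.mem_append, List.mem_map]
      constructor
      · rintro (h | ⟨v, hv, rfl⟩)
        · exact Or.inl ((ih y).mp h)
        · exact Or.inr ⟨v, (ih v).mp hv, rfl⟩
      · rintro (h | ⟨v, hv, rfl⟩)
        · exact Or.inl ((ih y).mpr h)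
        · exact Or.inr ⟨v, (ih v).mpr hv, rfl⟩

theorem pvVals_head (nums : List Int) : ∃ t, pvVals nums = 0 :: t := by
  induction nums using List.reverseRecOn with
  | nil => exact ⟨[], rfl⟩
  | append_singleton xs x ih =>
      obtain ⟨t, ht⟩ := ih
      unfold pvVals at *
      rw [List.foldl_append]
      simp only [List.foldl_cons, List.foldl_nil]
      rw [ht]
      exact ⟨t ++ List.filter (fun y => !(PySem.Set.contains (0 :: t) y))
        (PySem.Set.ofList ((0 :: t).map (fun v => PySem.Int.bxor v x))),
        by rw [show (PySem.Set.union (0 :: t) ((0 :: t).map (fun v => PySem.Int.bxor v x))) =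
              PySem.Set.update (0 :: t) ((0 :: t).map (fun v => PySem.Int.bxor v x)) from rfl,
            PySem.Set.update_eq_append_filter]; rfl⟩

theorem pvA_eq (nums : List Int) : maximum_xor_subset nums = (pvSeq nums).foldl max 0 := by
  show (PySem.List.pyRange 0 ((1 <<< nums.length : Nat) : Int) 1).foldl
      (fun max_xor mask => max max_xor (pvCur nums mask)) 0 = (pvSeq nums).foldl max 0
  rw [Nat.one_shiftLeft, show (PySem.List.pyRange 0 (((2 ^ nums.length : Nat)) : Int) 1) =
        (List.range (2 ^ nums.length)).map (fun k => ((k : Nat) : Int)) from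
      PySem.List.pyRange_zero_nat _,
    List.foldl_map, ← List.foldl_map (f := fun m => pvCur nums ((m : Nat) : Int)) (g := max),
    pvMap_cur_eq_seq]

theorem pvB_eq (nums : List Int) : maximum_xor_subset_alt nums = (pvVals nums : List Int).foldl max 0 := by
  obtain ⟨t, ht⟩ := pvVals_head nums
  show (PySem.List.max? (pvVals nums) (fun y => y)).getD 0 = (pvVals nums : List Int).foldl max 0
  rw [ht, PySem.List.max?_id_cons]
  simp

-- ===== VERDICT (by name: the statement is the Claim_ definition above) =====
theorem maximum_xor_subset_spec : Claim_equal_maximum_xor_subset := by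
  intro nums _
  unfold Spec_maximum_xor_subset
  rw [pvA_eq, pvB_eq]
  exact pvFoldl_max_congr _ _ _ (fun x => ((pvMem_vals nums x).symm))
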